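-- pv_equiv track=rewrite | github.com/esteok/-Python-Programming | Lab 10.py | dictionaryFunction
-- ===== SOURCE A (Python) =====
-- def dictionaryFunction(Dictionary1,Dictionary2):
--     resultDictionary = {}
--     for i in Dictionary1:
--         for x in Dictionary2:
--             if i==x:
--                 if Dictionary1[i]==Dictionary2[x]:
--                     resultDictionary[i] = Dictionary1[i]
--
--     return resultDictionary
-- ===== SOURCE B (Python) =====
-- def dictionaryFunction(Dictionary1, Dictionary2):
--     # Multiset counting: dict keys are unique, so a (key, value) pair occurs at most
--     # once per dict; a pair occurs exactly twice in the concatenation of both item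
--     # lists iff the key is in both dicts with equal values.
--     count = {}
--     for kv in list(Dictionary1.items()) + list(Dictionary2.items()):
--         count[kv] = count.get(kv, 0) + 1
--     return {k: v for k, v in Dictionary1.items() if count[(k, v)] == 2}
-- ===== Notes on version B (the rewrite author's own statement) =====
-- stated objective: alternative
-- what changed: Replaces A's nested key-by-key scan with a multiset-counting algorithm: one counting pass over the concatenation of both item lists (a pair occurs twice iff the key is in both dicts with equal value), then one pass over Dictionary1's items keeping the pairs counted twice.
import Mathlib
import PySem

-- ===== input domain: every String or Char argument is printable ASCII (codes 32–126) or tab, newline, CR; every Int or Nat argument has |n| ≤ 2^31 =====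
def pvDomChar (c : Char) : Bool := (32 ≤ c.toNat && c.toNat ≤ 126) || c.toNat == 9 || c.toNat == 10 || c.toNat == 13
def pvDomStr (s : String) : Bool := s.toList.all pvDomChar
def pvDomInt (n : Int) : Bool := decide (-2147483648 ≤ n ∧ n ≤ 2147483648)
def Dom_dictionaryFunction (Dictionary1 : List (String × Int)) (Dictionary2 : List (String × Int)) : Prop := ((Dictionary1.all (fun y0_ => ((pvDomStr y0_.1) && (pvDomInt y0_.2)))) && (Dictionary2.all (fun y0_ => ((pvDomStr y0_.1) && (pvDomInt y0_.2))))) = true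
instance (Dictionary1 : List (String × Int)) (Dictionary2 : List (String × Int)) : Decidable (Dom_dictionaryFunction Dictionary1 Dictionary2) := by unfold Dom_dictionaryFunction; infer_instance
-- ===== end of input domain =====

-- B replaces A's nested key-by-key scan by multiset counting over the concatenation of the
-- two item lists: a (key, value) pair occurs twice iff the key is in both dicts with equal
-- values; a final pass over Dictionary1's items keeps the pairs counted twice.

-- ===== PORT A =====
-- `Dictionary1[i]` is read with getD 0; this is exact because i is always a key of d1
-- (resp. x of d2) at that point, so Python's indexing never raises.
def dictionaryFunction (Dictionary1 : List (String × Int)) (Dictionary2 : List (String × Int)) : List (String × Int) :=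
  let d1 : PySem.Dict String Int := PySem.Dict.ofList Dictionary1
  let d2 : PySem.Dict String Int := PySem.Dict.ofList Dictionary2
  let resultDictionary : PySem.Dict String Int :=
    d1.keys.foldl (fun res i =>
      d2.keys.foldl (fun res x =>
        if i == x then
          if d1.getD i 0 == d2.getD x 0 then res.insert i (d1.getD i 0) else res
        else res) res) PySem.Dict.empty
  resultDictionary.items

-- ===== PORT B =====
-- `count[(k, v)]` is read with getD 0; this is exact because (k, v) ∈ items1 was counted,
-- so the key is present and Python's indexing never raises.
def dictionaryFunction_alt (Dictionary1 : List (String × Int)) (Dictionary2 : List (String × Int)) : List (String × Int) :=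
  let items1 := (PySem.Dict.ofList Dictionary1 : PySem.Dict String Int).items
  let items2 := (PySem.Dict.ofList Dictionary2 : PySem.Dict String Int).items
  let count : PySem.Dict (String × Int) Int :=
    (items1 ++ items2).foldl (fun c kv => c.insert kv (c.getD kv 0 + 1)) PySem.Dict.empty
  items1.filter (fun kv => count.getD kv 0 == 2)

-- ===== PRECONDITION & SPEC =====
def Spec_dictionaryFunction (Dictionary1 : List (String × Int)) (Dictionary2 : List (String × Int)) (out : List (String × Int)) : Prop := out = dictionaryFunction_alt Dictionary1 Dictionary2
instance (Dictionary1 : List (String × Int)) (Dictionary2 : List (String × Int)) (out : List (String × Int)) : Decidable (Spec_dictionaryFunction Dictionary1 Dictionary2 out) := by unfold Spec_dictionaryFunction; infer_instance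

-- ===== CLAIM (what is proved, stated in full; the proofs are below) =====
def Claim_equal_dictionaryFunction : Prop := ∀ (Dictionary1 : List (String × Int)) (Dictionary2 : List (String × Int)), Dom_dictionaryFunction Dictionary1 Dictionary2 → Spec_dictionaryFunction Dictionary1 Dictionary2 (dictionaryFunction Dictionary1 Dictionary2)

-- ===== LEMMAS AND PROOFS =====

-- A's inner loop over d2's keys inserts (i, v) exactly when some key equals i and the
-- values agree (repeated inserts of the same pair are absorbed by insert_insert_self).
theorem pv_inner_loop (d2 : PySem.Dict String Int) (l2 : List String) (res : PySem.Dict String Int)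
    (i : String) (v : Int) :
    l2.foldl (fun res x =>
        if i == x then
          if v == d2.getD x 0 then res.insert i v else res
        else res) res
      = if l2.contains i && (v == d2.getD i 0) then res.insert i v else res := by
  induction l2 generalizing res with
  | nil => simp
  | cons x l2 ih =>
    rw [List.foldl_cons, ih]
    by_cases hx : i = x
    · subst hx
      by_cases hv : v = d2.getD i 0
      · have hbv : (v == d2.getD i 0) = true := beq_iff_eq.mpr hv
        simp only [BEq.rfl, if_true, hbv, Bool.and_true, List.contains_cons, Bool.true_or]
        by_cases hc : l2.contains i = true
        · rw [if_pos hc, PySem.Dict.insert_insert_self]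
        · rw [if_neg hc]
      · have hbv : (v == d2.getD i 0) = false := beq_eq_false_iff_ne.mpr hv
        simp [hbv]
    · have hbx : (i == x) = false := beq_eq_false_iff_ne.mpr hx
      have hbx' : (x == i) = false := beq_eq_false_iff_ne.mpr (Ne.symm hx)
      simp [hbx, hx]

-- Folding A's (already simplified) step over distinct fresh keys appends exactly the
-- filtered pairs.
theorem pv_outer_loop (d1 d2 : PySem.Dict String Int) (l : List String) (res : PySem.Dict String Int)
    (hnd : l.Nodup) (hfresh : ∀ k ∈ l, res.contains k = false) :
    (l.foldl (fun res i =>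
        if d2.keys.contains i && (d1.getD i 0 == d2.getD i 0) then res.insert i (d1.getD i 0) else res) res).items
      = res.items ++ (l.filter (fun k => d2.keys.contains k && (d1.getD k 0 == d2.getD k 0))).map
          (fun k => (k, d1.getD k 0)) := by
  induction l generalizing res with
  | nil => simp
  | cons i l ih =>
    rw [List.foldl_cons, List.filter_cons]
    have hi := hfresh i (by simp)
    have hnd' : l.Nodup := hnd.of_cons
    have hmem : i ∉ l := (List.nodup_cons.mp hnd).1
    by_cases hc : (d2.keys.contains i && (d1.getD i 0 == d2.getD i 0)) = true
    · rw [if_pos hc, if_pos hc]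
      have hfresh' : ∀ k ∈ l, (res.insert i (d1.getD i 0)).contains k = false := by
        intro k hk
        rw [PySem.Dict.contains_insert]
        have hne : k ≠ i := fun h => hmem (h ▸ hk)
        simp [beq_false_of_ne hne, hfresh k (List.mem_cons_of_mem _ hk)]
      rw [ih (res.insert i (d1.getD i 0)) hnd' hfresh',
          PySem.Dict.items_insert_of_not_contains _ _ hi]
      simp
    · rw [if_neg hc, if_neg hc]
      exact ih res hnd' (fun k hk => hfresh k (List.mem_cons_of_mem _ hk))

-- The simplified loop condition is exactly "(k, v) is an item of d2".
theorem pv_cond_eq (d2 : PySem.Dict String Int) (k : String) (v : Int) :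
    (d2.keys.contains k && (v == d2.getD k 0)) = (d2.get? k == some v) := by
  cases h : d2.get? k with
  | none =>
    have hk : k ∉ d2.keys := (PySem.Dict.get?_eq_none_iff_not_mem_keys d2 k).mp h
    simp [hk]
  | some w =>
    have hk : k ∈ d2.keys := by
      by_contra hk
      rw [(PySem.Dict.get?_eq_none_iff_not_mem_keys d2 k).mpr hk] at h
      simp at h
    have hd : d2.getD k 0 = w := PySem.Dict.getD_of_get?_eq_some d2 0 h
    rw [hd]
    by_cases hv : v = w
    · subst hv
      simp [hk]
    · simp [beq_eq_false_iff_ne.mpr hv, hk,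
        beq_eq_false_iff_ne.mpr (fun h' : some w = some v => hv (Option.some.inj h').symm)]

-- Items of a dict with Nodup keys form a Nodup list of pairs.
theorem pv_items_nodup (d : PySem.Dict String Int) (h : d.keys.Nodup) : d.items.Nodup := by
  have : d.keys = d.items.map Prod.fst := by simp only [PySem.Dict.keys]
  rw [this] at h
  exact h.of_map

-- B's count of a pair kv ∈ items1 is 1 + (items2.count kv); it equals 2 iff kv ∈ items2.
theorem pv_count_cond (items1 items2 : List (String × Int)) (hnd1 : items1.Nodup)
    (hnd2 : items2.Nodup) (kv : String × Int) (hkv : kv ∈ items1) :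
    (((items1 ++ items2).foldl
        (fun c p => c.insert p (c.getD p 0 + 1)) (PySem.Dict.empty : PySem.Dict (String × Int) Int)).getD kv 0 == 2)
      = (items2.contains kv) := by
  rw [PySem.Dict.getD_foldl_insert_add_one, PySem.Dict.getD_empty, List.count_append,
      List.count_eq_one_of_mem hnd1 hkv]
  by_cases h2 : kv ∈ items2
  · rw [List.count_eq_one_of_mem hnd2 h2]
    simp [h2]
  · rw [List.count_eq_zero_of_not_mem h2]
    simp [h2]

-- kv ∈ d2.items iff looking kv.1 up in d2 yields kv.2.
theorem pv_mem_items_iff (d2 : PySem.Dict String Int) (hnd2 : d2.keys.Nodup) (kv : String × Int) :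
    (d2.items.contains kv) = (d2.get? kv.1 == some kv.2) := by
  by_cases h : d2.get? kv.1 = some kv.2
  · have : kv ∈ d2.items := by
      have := PySem.Dict.mem_items_of_get?_eq_some d2 h
      simpa using this
    simp [h, this]
  · have hm : kv ∉ d2.items := by
      intro hmem
      exact h (PySem.Dict.get?_of_mem_items d2
        (show (kv.1, kv.2) ∈ d2.items from by simpa using hmem) hnd2)
    simp [hm, beq_eq_false_iff_ne.mpr h]

-- Main equivalence: A's nested loops produce exactly B's count-filtered item list.
theorem pv_main (d1 d2 : PySem.Dict String Int) (hnd1 : d1.keys.Nodup) (hnd2 : d2.keys.Nodup) :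
    (d1.keys.foldl (fun res i =>
        d2.keys.foldl (fun res x =>
          if i == x then
            if d1.getD i 0 == d2.getD x 0 then res.insert i (d1.getD i 0) else res
          else res) res) PySem.Dict.empty).items
      = d1.items.filter (fun kv =>
          ((d1.items ++ d2.items).foldl
            (fun c p => c.insert p (c.getD p 0 + 1)) (PySem.Dict.empty : PySem.Dict (String × Int) Int)).getD kv 0 == 2) := by
  have hstep : (fun (res : PySem.Dict String Int) i =>
      d2.keys.foldl (fun res x =>
        if i == x then
          if d1.getD i 0 == d2.getD x 0 then res.insert i (d1.getD i 0) else res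
        else res) res)
      = (fun res i =>
        if d2.keys.contains i && (d1.getD i 0 == d2.getD i 0) then res.insert i (d1.getD i 0) else res) := by
    funext res i
    exact pv_inner_loop d2 d2.keys res i (d1.getD i 0)
  rw [hstep, pv_outer_loop d1 d2 d1.keys PySem.Dict.empty hnd1
      (fun k _ => PySem.Dict.contains_empty k)]
  rw [PySem.Dict.items_eq_map_keys d1 hnd1 0, List.filter_map]
  rw [show (PySem.Dict.empty : PySem.Dict String Int).items = [] from rfl, List.nil_append]
  refine congrArg _ (List.filter_congr ?_)
  intro k hk
  simp only [Function.comp]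
  rw [pv_cond_eq d2 k (d1.getD k 0)]
  have hmem : (k, d1.getD k 0) ∈ d1.items := by
    rw [PySem.Dict.items_eq_map_keys d1 hnd1 0]
    exact List.mem_map.mpr ⟨k, hk, rfl⟩
  rw [← PySem.Dict.items_eq_map_keys d1 hnd1 0]
  rw [pv_count_cond d1.items d2.items (pv_items_nodup d1 hnd1) (pv_items_nodup d2 hnd2) _ hmem,
      pv_mem_items_iff d2 hnd2 (k, d1.getD k 0)]

-- ===== VERDICT (by name: the statement is the Claim_ definition above) =====
theorem dictionaryFunction_spec : Claim_equal_dictionaryFunction := by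
  intro D1 D2 _
  show dictionaryFunction D1 D2 = dictionaryFunction_alt D1 D2
  exact pv_main (PySem.Dict.ofList D1) (PySem.Dict.ofList D2)
    (PySem.Dict.nodup_keys_ofList D1) (PySem.Dict.nodup_keys_ofList D2)
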